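-- pv_equiv track=rewrite | github.com/Shreyasvprasad/DSA | EKO.py | find_maximum_sawblade_height
-- ===== SOURCE A (Python) =====
-- def can_cut_trees(heights, n, M, H):
--     wood_cut = 0
--     for height in heights:
--         if height > H:
--             wood_cut += height - H
--     return wood_cut >= M
--
-- def find_maximum_sawblade_height(heights, n, M):
--     low = 1
--     high = max(heights)
--     result = 0
--
--     while low <= high:
--         mid = (low + high) // 2
--         if can_cut_trees(heights, n, M, mid):
--             result = mid
--             low = mid + 1
--         else:
--             high = mid - 1
--
--     return result
-- ===== SOURCE B (Python) =====
-- def find_maximum_sawblade_height(heights, n, M):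
--     mx = max(heights)
--     if mx < 1:
--         return 0
--     if M <= 0:
--         return mx
--     s = sorted(heights, reverse=True)
--     P = 0
--     best = 0
--     for k in range(1, len(s) + 1):
--         P += s[k - 1]
--         best = max(best, (P - M) // k)
--     return best
-- ===== Notes on version B (the rewrite author's own statement) =====
-- stated objective: alternative
-- what changed: Replaces A's binary search over cut heights (each probe rescanning all trees) with sort-descending + prefix sums, taking the maximum of (P_k - M)//k over prefixes in one pass.
-- outside the precondition, e.g. on find_maximum_sawblade_height([], 0, 5): A raises ValueError, B raises ValueError
import Mathlib
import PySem

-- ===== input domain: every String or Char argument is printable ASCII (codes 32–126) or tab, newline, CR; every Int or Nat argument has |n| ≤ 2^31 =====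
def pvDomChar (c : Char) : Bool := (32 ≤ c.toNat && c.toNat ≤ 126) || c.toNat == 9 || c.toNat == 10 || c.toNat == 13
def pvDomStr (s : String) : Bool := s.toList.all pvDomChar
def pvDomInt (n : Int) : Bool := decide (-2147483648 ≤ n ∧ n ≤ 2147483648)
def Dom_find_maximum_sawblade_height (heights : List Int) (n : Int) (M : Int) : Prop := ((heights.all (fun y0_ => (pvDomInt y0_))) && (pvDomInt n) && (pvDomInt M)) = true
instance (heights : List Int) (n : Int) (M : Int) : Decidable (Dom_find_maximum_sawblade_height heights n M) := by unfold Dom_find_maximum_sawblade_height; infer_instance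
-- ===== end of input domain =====

-- B replaces A's binary search over cut heights (a feasibility scan per probe) by sort +
-- prefix sums, reading the answer off the prefix maxima in one pass; objective: alternative.

-- ===== PORT A =====
def can_cut_trees (heights : List Int) (n : Int) (M : Int) (H : Int) : Bool :=
  decide (M ≤ heights.foldl (fun acc h => if h > H then acc + (h - H) else acc) 0)

def pvAwhile (heights : List Int) (n M : Int) (low high result : Int) : Int :=
  if h : low ≤ high then
    let mid := PySem.Int.floordiv (low + high) 2
    if can_cut_trees heights n M mid then
      pvAwhile heights n M (mid + 1) high mid
    else
      pvAwhile heights n M low (mid - 1) result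
  else result
termination_by (high + 1 - low).toNat
decreasing_by
  · have := PySem.Int.floordiv_two_mid_bounds h; omega
  · have := PySem.Int.floordiv_two_mid_bounds h; omega

def find_maximum_sawblade_height (heights : List Int) (n : Int) (M : Int) : Int :=
  match PySem.List.max? heights (fun x => x) with
  | none => 0      -- Python raises ValueError on max([]); excluded by Pre_
  | some high => pvAwhile heights n M 1 high 0

-- ===== PORT B =====
def pvBloop (M : Int) : List Int → Int → Int → Int → Int
  | [], _, _, best => best
  | h :: t, k, P, best =>
      pvBloop M t (k + 1) (P + h) (max best (PySem.Int.floordiv (P + h - M) k))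

def find_maximum_sawblade_height_alt (heights : List Int) (n : Int) (M : Int) : Int :=
  match PySem.List.max? heights (fun x => x) with
  | none => 0      -- max([]) raises in B too; excluded by Pre_
  | some mx =>
    if mx < 1 then 0
    else if M ≤ 0 then mx
    else pvBloop M (PySem.List.sorted heights (fun x => x) true) 1 0 0

-- ===== PRECONDITION & SPEC =====
-- Pre_ excludes only the empty list, on which Python's max([]) raises ValueError in both A and B.
def Pre_find_maximum_sawblade_height (heights : List Int) (n : Int) (M : Int) : Prop := heights ≠ []
instance (heights : List Int) (n : Int) (M : Int) : Decidable (Pre_find_maximum_sawblade_height heights n M) := by unfold Pre_find_maximum_sawblade_height; infer_instance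
def pvWitness_find_maximum_sawblade_height : List Int × Int × Int := ([20, 15, 10, 17], 4, 7)

def Spec_find_maximum_sawblade_height (heights : List Int) (n : Int) (M : Int) (out : Int) : Prop := out = find_maximum_sawblade_height_alt heights n M
instance (heights : List Int) (n : Int) (M : Int) (out : Int) : Decidable (Spec_find_maximum_sawblade_height heights n M out) := by unfold Spec_find_maximum_sawblade_height; infer_instance

-- ===== CLAIM (what is proved, stated in full; the proofs are below) =====
def Claim_equal_find_maximum_sawblade_height : Prop := ∀ (heights : List Int) (n : Int) (M : Int), Dom_find_maximum_sawblade_height heights n M → Pre_find_maximum_sawblade_height heights n M → Spec_find_maximum_sawblade_height heights n M (find_maximum_sawblade_height heights n M)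

-- ===== LEMMAS AND PROOFS =====

-- the total wood cut at blade height t, as a sum
def pvWood (l : List Int) (t : Int) : Int := (l.map (fun h => if h > t then h - t else 0)).sum

-- feasibility predicate shared by both characterizations
def pvFeas (heights : List Int) (M t : Int) : Prop := M ≤ pvWood heights t

lemma foldl_wood (t : Int) : ∀ (l : List Int) (acc : Int),
    l.foldl (fun acc h => if h > t then acc + (h - t) else acc) acc = acc + pvWood l t := by
  intro l
  induction l with
  | nil => intro acc; simp [pvWood]
  | cons h tl ih =>
    intro acc
    simp only [List.foldl_cons, pvWood, List.map_cons, List.sum_cons]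
    by_cases hc : h > t
    · simp [hc, ih, pvWood]; ring
    · simp [hc, ih, pvWood]

lemma can_cut_iff (heights : List Int) (n M H : Int) :
    can_cut_trees heights n M H = true ↔ pvFeas heights M H := by
  simp [can_cut_trees, foldl_wood, pvFeas]

lemma wood_nonneg (l : List Int) (t : Int) : 0 ≤ pvWood l t := by
  induction l with
  | nil => simp [pvWood]
  | cons h tl ih =>
    simp only [pvWood, List.map_cons, List.sum_cons] at *
    split_ifs with hc <;> omega

lemma wood_perm {l l' : List Int} (hp : l.Perm l') (t : Int) : pvWood l t = pvWood l' t :=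
  List.Perm.sum_eq (List.Perm.map _ hp)

lemma wood_antitone (l : List Int) {t u : Int} (h : t ≤ u) : pvWood l u ≤ pvWood l t := by
  induction l with
  | nil => simp [pvWood]
  | cons a tl ih =>
    simp only [pvWood, List.map_cons, List.sum_cons] at *
    split_ifs with h1 h2 h2 <;> omega

lemma feas_mono (heights : List Int) (M : Int) {t u : Int} (h : t ≤ u)
    (hf : pvFeas heights M u) : pvFeas heights M t :=
  le_trans hf (wood_antitone heights h)

lemma wood_zero_of_le (l : List Int) (t : Int) (h : ∀ x ∈ l, x ≤ t) : pvWood l t = 0 := by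
  induction l with
  | nil => simp [pvWood]
  | cons a tl ih =>
    have ha := h a (by simp)
    simp only [pvWood, List.map_cons, List.sum_cons]
    rw [if_neg (by omega)]
    simpa [pvWood] using ih (fun x hx => h x (by simp [hx]))

-- lower bound on wood from any prefix
lemma wood_take_lb (l : List Int) (t : Int) (ht : 0 ≤ t) : ∀ j : Nat,
    (l.take j).sum - (j : Int) * t ≤ pvWood l t := by
  induction l with
  | nil => intro j; simp [pvWood]; positivity
  | cons a tl ih =>
    intro j
    cases j with
    | zero => simpa using wood_nonneg (a :: tl) t
    | succ j' =>
      have := ih j'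
      simp only [List.take_succ_cons, List.sum_cons, pvWood, List.map_cons,
        List.sum_cons] at *
      push_cast
      split_ifs with hc <;> nlinarith

-- on a descending list, the elements above t are exactly a prefix
lemma filter_eq_take_of_desc (t : Int) : ∀ (l : List Int),
    l.Pairwise (fun a b => b ≤ a) →
    l.filter (fun h => decide (h > t)) = l.take (l.countP (fun h => decide (h > t))) := by
  intro l
  induction l with
  | nil => simp
  | cons a tl ih =>
    intro hp
    rw [List.pairwise_cons] at hp
    by_cases hc : a > t
    · simp only [List.filter_cons, List.countP_cons, hc, decide_true, if_pos, cond_true]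
      rw [ih hp.2]
      simp
    · have h0 : tl.countP (fun h => decide (h > t)) = 0 := by
        rw [List.countP_eq_zero]
        intro x hx
        have := hp.1 x hx
        simp; omega
      have hf : tl.filter (fun h => decide (h > t)) = [] := by
        rw [List.filter_eq_nil_iff]
        intro x hx
        have := hp.1 x hx
        simp; omega
      simp only [List.filter_cons, List.countP_cons, hc, decide_false, cond_false, if_neg hc, h0, hf]
      simp

lemma wood_eq_filter (l : List Int) (t : Int) :
    pvWood l t = (l.filter (fun h => decide (h > t))).sum
      - ((l.countP (fun h => decide (h > t))) : Int) * t := by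
  induction l with
  | nil => simp [pvWood]
  | cons a tl ih =>
    simp only [pvWood, List.map_cons, List.sum_cons, List.filter_cons, List.countP_cons] at *
    by_cases hc : a > t
    · simp only [hc, decide_true, cond_true, if_pos, List.sum_cons]
      push_cast
      rw [ih]; ring
    · simp only [hc, decide_false, cond_false, if_neg hc]
      push_cast
      rw [ih]; ring

-- for a descending list: wood t = P_j - j*t with j = count of elements above t
lemma wood_desc (l : List Int) (t : Int) (hp : l.Pairwise (fun a b => b ≤ a)) :
    pvWood l t = (l.take (l.countP (fun h => decide (h > t)))).sum
      - ((l.countP (fun h => decide (h > t))) : Int) * t := by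
  rw [wood_eq_filter, filter_eq_take_of_desc t l hp]

-- ===== pvBloop lemmas =====
lemma bloop_ge_best (M : Int) : ∀ (s : List Int) (k P best : Int), best ≤ pvBloop M s k P best := by
  intro s
  induction s with
  | nil => intro k P best; simp [pvBloop]
  | cons h t ih =>
    intro k P best
    calc best ≤ max best (PySem.Int.floordiv (P + h - M) k) := le_max_left _ _
    _ ≤ _ := ih _ _ _

lemma bloop_ge (M : Int) : ∀ (s : List Int) (k P best : Int) (j : Nat),
    1 ≤ j → j ≤ s.length →
    PySem.Int.floordiv (P + (s.take j).sum - M) (k + (j : Int) - 1) ≤ pvBloop M s k P best := by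
  intro s
  induction s with
  | nil => intro k P best j h1 h2; simp at h2; omega
  | cons h t ih =>
    intro k P best j h1 h2
    cases j with
    | zero => omega
    | succ j' =>
      cases Nat.eq_zero_or_pos j' with
      | inl hz =>
        subst hz
        simp only [List.take_succ_cons, List.take_zero, List.sum_cons, List.sum_nil,
          add_zero, Nat.cast_one, pvBloop]
        have : PySem.Int.floordiv (P + h - M) (k + 1 - 1) ≤
            max best (PySem.Int.floordiv (P + h - M) k) := by
          rw [show k + 1 - 1 = k by ring]
          exact le_max_right _ _
        exact le_trans this (bloop_ge_best M t _ _ _)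
      | inr hpos =>
        have := ih (k + 1) (P + h) (max best (PySem.Int.floordiv (P + h - M) k)) j' hpos
          (by simp at h2; omega)
        simp only [pvBloop, List.take_succ_cons, List.sum_cons]
        have heq : P + (h + (t.take j').sum) - M = (P + h) + (t.take j').sum - M := by ring
        have hk : k + ((j' : Int) + 1) - 1 = (k + 1) + (j' : Int) - 1 := by ring
        rw [show ((j' + 1 : Nat) : Int) = (j' : Int) + 1 by push_cast; ring, hk, heq]
        exact this

lemma bloop_cases (M : Int) : ∀ (s : List Int) (k P best : Int),
    pvBloop M s k P best = best ∨
    ∃ j : Nat, 1 ≤ j ∧ j ≤ s.length ∧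
      pvBloop M s k P best = PySem.Int.floordiv (P + (s.take j).sum - M) (k + (j : Int) - 1) := by
  intro s
  induction s with
  | nil => intro k P best; left; rfl
  | cons h t ih =>
    intro k P best
    simp only [pvBloop]
    rcases ih (k + 1) (P + h) (max best (PySem.Int.floordiv (P + h - M) k)) with hb | ⟨j, hj1, hj2, hj3⟩
    · rw [hb]
      rcases max_cases best (PySem.Int.floordiv (P + h - M) k) with ⟨he, _⟩ | ⟨he, _⟩
      · left; exact he
      · right
        refine ⟨1, le_refl _, by simp, ?_⟩
        rw [he]
        norm_num
    · right
      refine ⟨j + 1, by omega, by simp; omega, ?_⟩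
      rw [hj3]
      congr 1
      · simp; ring
      · push_cast; ring

-- ===== the common characterization =====
def pvPost (heights : List Int) (M mx r : Int) : Prop :=
  0 ≤ r ∧ (r = 0 ∨ (1 ≤ r ∧ pvFeas heights M r ∧ r ≤ mx)) ∧
  (∀ t, r < t → t ≤ mx → ¬ pvFeas heights M t)

lemma awhile_post (heights : List Int) (n M mx : Int) : ∀ (low high result : Int),
    low = result + 1 → 0 ≤ result → high ≤ mx →
    (result = 0 ∨ (1 ≤ result ∧ pvFeas heights M result ∧ result ≤ mx)) →
    (∀ t, high < t → t ≤ mx → ¬ pvFeas heights M t) →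
    pvPost heights M mx (pvAwhile heights n M low high result) := by
  intro low high result hlow hres hhigh hgood hbad
  rw [pvAwhile]
  split
  case isTrue hle =>
    have hmid := PySem.Int.floordiv_two_mid_bounds hle
    set mid := PySem.Int.floordiv (low + high) 2 with hmiddef
    by_cases hc : can_cut_trees heights n M mid = true
    · rw [if_pos hc]
      exact awhile_post heights n M mx (mid + 1) high mid rfl (by omega) hhigh
        (Or.inr ⟨by omega, (can_cut_iff heights n M mid).mp hc, by omega⟩) hbad
    · rw [if_neg hc]
      refine awhile_post heights n M mx low (mid - 1) result hlow hres (by omega) hgood ?_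
      intro t ht htmx hf
      exact hc ((can_cut_iff heights n M mid).mpr (feas_mono heights M (by omega) hf))
  case isFalse hle =>
    exact ⟨hres, hgood, fun t ht htmx => hbad t (by omega) htmx⟩
termination_by low high result => (high + 1 - low).toNat
decreasing_by
  · have := PySem.Int.floordiv_two_mid_bounds (by assumption : low ≤ high); omega
  · have := PySem.Int.floordiv_two_mid_bounds (by assumption : low ≤ high); omega

lemma a_post (heights : List Int) (n M mx : Int)
    (hmx : PySem.List.max? heights (fun x => x) = some mx) :
    pvPost heights M mx (find_maximum_sawblade_height heights n M) := by
  unfold find_maximum_sawblade_height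
  rw [hmx]
  exact awhile_post heights n M mx 1 mx 0 rfl (le_refl 0) (le_refl mx)
    (Or.inl rfl) (fun t h1 h2 _ => absurd (lt_of_lt_of_le h1 h2) (lt_irrefl mx))

lemma b_post (heights : List Int) (n M mx : Int)
    (hmx : PySem.List.max? heights (fun x => x) = some mx) :
    pvPost heights M mx (find_maximum_sawblade_height_alt heights n M) := by
  have hmax : ∀ y ∈ heights, y ≤ mx := by
    intro y hy; exact PySem.List.max?_isMax hmx y hy
  unfold find_maximum_sawblade_height_alt
  rw [hmx]
  dsimp only
  by_cases h1 : mx < 1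
  · rw [if_pos h1]
    refine ⟨le_refl 0, Or.inl rfl, ?_⟩
    intro t ht htmx
    omega
  · rw [if_neg h1]
    by_cases h2 : M ≤ 0
    · rw [if_pos h2]
      refine ⟨by omega, Or.inr ⟨by omega, ?_, le_refl mx⟩, ?_⟩
      · exact le_trans h2 (wood_nonneg heights mx)
      · intro t ht htmx; omega
    · rw [if_neg h2]
      set d := PySem.List.sorted heights (fun x => x) true with hd
      have hperm : d.Perm heights := PySem.List.sorted_perm heights (fun x => x) true
      have hpair : d.Pairwise (fun a b => b ≤ a) := PySem.List.sorted_pairwise_rev heights (fun x => x)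
      have hdmax : ∀ y ∈ d, y ≤ mx := fun y hy => hmax y (hperm.mem_iff.mp hy)
      set b := pvBloop M d 1 0 0 with hb
      have hb0 : 0 ≤ b := bloop_ge_best M d 1 0 0
      refine ⟨hb0, ?_, ?_⟩
      · -- b = 0 or b is feasible and in range
        rcases bloop_cases M d 1 0 0 with hz | ⟨j, hj1, hj2, hj3⟩
        · left; exact hz
        · by_cases hb1 : 1 ≤ b
          · right
            have hjpos : (0 : Int) < (j : Int) := by exact_mod_cast hj1
            have hj3' : b = PySem.Int.floordiv (0 + (d.take j).sum - M) (j : Int) := by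
              rw [hb, hj3]; congr 1; ring
            have hdvd : b * (j : Int) ≤ 0 + (d.take j).sum - M :=
              (PySem.Int.le_floordiv_iff_mul_le hjpos).mp (le_of_eq hj3')
            have hfeas : pvFeas heights M b := by
              have hlb := wood_take_lb d b (by omega) j
              have : M ≤ pvWood d b := by nlinarith
              unfold pvFeas
              rwa [← wood_perm hperm b]
            refine ⟨hb1, hfeas, ?_⟩
            -- b ≤ mx since wood b ≥ M ≥ 1 > 0 = wood mx
            by_contra hgt
            have : pvWood heights b = 0 :=
              wood_zero_of_le heights b (fun x hx => by have := hmax x hx; omega)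
            unfold pvFeas at hfeas; omega
          · left; omega
      · -- nothing above b (and ≤ mx) is feasible
        intro t ht htmx hf
        have hfd : pvFeas d M t := by unfold pvFeas at hf ⊢; rwa [wood_perm hperm t]
        set j := d.countP (fun h => decide (h > t)) with hj
        have hwd := wood_desc d t hpair
        have hjlen : j ≤ d.length := List.countP_le_length
        have hjpos : 1 ≤ j := by
          by_contra hz
          have hj0 : j = 0 := by omega
          unfold pvFeas at hfd
          rw [hwd] at hfd
          rw [← hj, hj0] at hfd
          simp at hfd
          omega
        have hjposZ : (0 : Int) < (j : Int) := by exact_mod_cast hjpos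
        have hmul : t * (j : Int) ≤ 0 + (d.take j).sum - M := by
          unfold pvFeas at hfd
          rw [hwd] at hfd
          rw [← hj] at hfd
          nlinarith
        have := bloop_ge M d 1 0 0 j hjpos hjlen
        rw [show (1 : Int) + (j : Int) - 1 = (j : Int) by ring, ← hb] at this
        have ht' : t ≤ PySem.Int.floordiv (0 + (d.take j).sum - M) (j : Int) :=
          (PySem.Int.le_floordiv_iff_mul_le hjposZ).mpr hmul
        omega

lemma post_unique (heights : List Int) (M mx r b : Int)
    (hr : pvPost heights M mx r) (hb : pvPost heights M mx b) : r = b := by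
  rcases hr with ⟨hr0, hrg, hrb⟩
  rcases hb with ⟨hb0, hbg, hbb⟩
  by_contra hne
  rcases lt_or_gt_of_ne hne with hlt | hlt
  · rcases hbg with h | ⟨h1, h2, h3⟩
    · omega
    · exact hrb b hlt h3 h2
  · rcases hrg with h | ⟨h1, h2, h3⟩
    · omega
    · exact hbb r hlt h3 h2

-- ===== VERDICT (by name: the statement is the Claim_ definition above) =====
theorem find_maximum_sawblade_height_spec : Claim_equal_find_maximum_sawblade_height := by
  intro heights n M _ hpre
  unfold Spec_find_maximum_sawblade_height
  cases hmx : PySem.List.max? heights (fun x => x) with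
  | none => exact absurd ((PySem.List.max?_eq_none_iff heights (fun x => x)).mp hmx) hpre
  | some mx =>
    exact post_unique heights M mx _ _ (a_post heights n M mx hmx) (b_post heights n M mx hmx)
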